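-- pv_equiv track=rewrite | github.com/GundalaNikhil/DSA | dsa-problems/Stacks/solutions/STK-005-workshop-next-taller-width.py | next_taller_within
-- ===== SOURCE A (Python) =====
-- def next_taller_within(h: list[int], w: int) -> list[int]:
--     n = len(h)
--     result = [-1] * n
--     stack = [] # Stores indices
--
--     for i in range(n - 1, -1, -1):
--         while stack and h[stack[-1]] <= h[i]:
--             stack.pop()
--
--         if stack:
--             j = stack[-1]
--             if j - i <= w:
--                 result[i] = h[j]
--             else:
--                 result[i] = -1
--
--         stack.append(i)
--
--     return result
-- ===== SOURCE B (Python) =====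
-- def next_taller_within(h: list[int], w: int) -> list[int]:
--     n = len(h)
--     result = []
--     for i in range(n):
--         val = -1
--         for j in range(i + 1, min(i + w, n - 1) + 1):
--             if h[j] > h[i]:
--                 val = h[j]
--                 break
--         result.append(val)
--     return result
-- ===== Notes on version B (the rewrite author's own statement) =====
-- stated objective: simpler
-- what changed: Replaces the backwards monotonic-stack pass (with window check on the stack top) by a direct forward windowed scan: for each i, look at h[i+1..min(i+w,n-1)] and take the first strictly taller height.
import Mathlib
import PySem

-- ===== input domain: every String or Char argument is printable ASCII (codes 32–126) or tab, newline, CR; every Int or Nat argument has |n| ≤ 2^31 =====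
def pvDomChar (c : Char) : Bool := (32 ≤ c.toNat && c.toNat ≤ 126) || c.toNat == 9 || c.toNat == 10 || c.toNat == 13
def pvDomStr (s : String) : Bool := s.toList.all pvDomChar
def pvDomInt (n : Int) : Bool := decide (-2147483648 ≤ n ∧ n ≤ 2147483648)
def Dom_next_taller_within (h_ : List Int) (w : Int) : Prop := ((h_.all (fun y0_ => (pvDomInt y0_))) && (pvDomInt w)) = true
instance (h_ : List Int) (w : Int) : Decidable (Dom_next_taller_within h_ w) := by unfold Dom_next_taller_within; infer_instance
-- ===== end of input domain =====

-- B replaces A's backwards monotonic-stack pass by a direct forward windowed scan (simpler; not faster).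

-- ===== PORT A =====
-- the `while stack and h[stack[-1]] <= h[i]: stack.pop()` loop (stack head = Python list end)
def ntwPop (h : List Int) (hi : Int) : List Int → List Int
  | [] => []
  | j :: rest =>
    if PySem.List.pyGetD h j 0 ≤ hi then ntwPop h hi rest else j :: rest

-- one iteration of A's `for i in range(n-1, -1, -1)` loop; state = (result, stack)
def ntwStep (h : List Int) (w : Int) (st : List Int × List Int) (i : Int) : List Int × List Int :=
  let stack := ntwPop h (PySem.List.pyGetD h i 0) st.2
  let res :=
    match stack with
    | [] => st.1
    | j :: _ =>
      if j - i ≤ w then PySem.List.pySetD st.1 i (PySem.List.pyGetD h j 0)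
      else PySem.List.pySetD st.1 i (-1)
  (res, i :: stack)

def next_taller_within (h_ : List Int) (w : Int) : List Int :=
  ((PySem.List.pyRange ((h_.length : Int) - 1) (-1) (-1)).foldl (ntwStep h_ w)
    (List.replicate h_.length (-1), [])).1

-- ===== PORT B =====
-- inner loop of B: first h[j] > h[i] among the window indices, else -1
def ntwScan (h : List Int) (hi : Int) : List Int → Int
  | [] => -1
  | j :: rest =>
    if hi < PySem.List.pyGetD h j 0 then PySem.List.pyGetD h j 0 else ntwScan h hi rest

def next_taller_within_alt (h_ : List Int) (w : Int) : List Int :=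
  (PySem.List.pyRange 0 (h_.length : Int) 1).foldl
    (fun res i =>
      res ++ [ntwScan h_ (PySem.List.pyGetD h_ i 0)
        (PySem.List.pyRange (i + 1) (min (i + w) ((h_.length : Int) - 1) + 1) 1)]) []

-- ===== PRECONDITION & SPEC =====
def Spec_next_taller_within (h_ : List Int) (w : Int) (out : List Int) : Prop := out = next_taller_within_alt h_ w
instance (h_ : List Int) (w : Int) (out : List Int) : Decidable (Spec_next_taller_within h_ w out) := by unfold Spec_next_taller_within; infer_instance

-- ===== CLAIM (what is proved, stated in full; the proofs are below) =====
def Claim_equal_next_taller_within : Prop := ∀ (h_ : List Int) (w : Int), Dom_next_taller_within h_ w → Spec_next_taller_within h_ w (next_taller_within h_ w)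

-- ===== LEMMAS AND PROOFS =====

-- value of h at an index
def ntwH (h : List Int) (j : Int) : Int := PySem.List.pyGetD h j 0

-- "taller than h[i]" test
def ntwQ (h : List Int) (i : Int) (j : Int) : Bool := decide (ntwH h i < ntwH h j)

-- reference value: first strictly taller index to the right, windowed by w
def ntwRef (h : List Int) (w : Int) (i : Int) : Int :=
  match (PySem.List.pyRange (i + 1) (h.length : Int) 1).find? (ntwQ h i) with
  | some j => if j - i ≤ w then ntwH h j else -1
  | none => -1

-- "j dominates everything from k up to j" (membership test of A's stack)
def ntwP (h : List Int) (k : Int) (j : Int) : Bool :=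
  (PySem.List.pyRange k j 1).all (fun t => decide (ntwH h t < ntwH h j))

-- specification of A's stack after all indices ≥ k are processed
def ntwStk (h : List Int) (k : Int) : List Int :=
  (PySem.List.pyRange k (h.length : Int) 1).filter (ntwP h k)

-- specification of A's result array after all indices ≥ k are processed
def ntwRes (h : List Int) (w : Int) (k : Int) : List Int :=
  (PySem.List.pyRange 0 (h.length : Int) 1).map (fun i => if k ≤ i then ntwRef h w i else -1)

-- dropping a conjunct that holds at the first satisfying element
theorem ntw_find_conj (l : List Int) (P Q : Int → Bool) (hl : l.Pairwise (· < ·))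
    (hPQ : ∀ j ∈ l, Q j = true → (∀ t ∈ l, t < j → Q t = false) → P j = true) :
    l.find? (fun j => Q j && P j) = l.find? Q := by
  induction l with
  | nil => rfl
  | cons a l ih =>
    by_cases hQ : Q a = true
    · have hP : P a = true := by
        refine hPQ a (by simp) hQ ?_
        intro t ht hlt
        exfalso
        rcases List.mem_cons.mp ht with rfl | ht
        · omega
        · exact absurd (List.rel_of_pairwise_cons hl ht) (by omega)
      rw [List.find?_cons_of_pos (by rw [hQ, hP]; rfl), List.find?_cons_of_pos hQ]
    · have hQ' : Q a = false := by simpa using hQ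
      rw [List.find?_cons_of_neg (by simp [hQ']), List.find?_cons_of_neg (by simp [hQ'])]
      refine ih hl.of_cons ?_
      intro j hj hQj hmin
      refine hPQ j (by simp [hj]) hQj ?_
      intro t ht hlt
      rcases List.mem_cons.mp ht with rfl | ht
      · exact hQ'
      · exact hmin t ht hlt

-- A's pop loop is a filter, on a stack whose heights increase downwards
theorem ntwPop_eq_filter (h : List Int) (x : Int) (l : List Int)
    (hl : l.Pairwise (fun a b => ntwH h a ≤ ntwH h b)) :
    ntwPop h x l = l.filter (fun j => decide (x < ntwH h j)) := by
  induction l with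
  | nil => rfl
  | cons j rest ih =>
    by_cases hj : PySem.List.pyGetD h j 0 ≤ x
    · have hd : (decide (x < ntwH h j)) = false := by simp [ntwH]; omega
      simp only [ntwPop, if_pos hj, List.filter_cons, hd, Bool.false_eq_true, if_false]
      exact ih hl.of_cons
    · have hd : (decide (x < ntwH h j)) = true := by simp [ntwH]; omega
      simp only [ntwPop, if_neg hj, List.filter_cons, hd, if_true]
      congr 1
      refine (List.filter_eq_self.mpr ?_).symm
      intro b hb
      have hle := List.rel_of_pairwise_cons hl hb
      simp only [ntwH] at *
      simp only [decide_eq_true_eq]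
      omega

-- heights along A's stack spec increase from top (head) to bottom
theorem ntwStk_pairwise (h : List Int) (k : Int) :
    (ntwStk h k).Pairwise (fun a b => ntwH h a ≤ ntwH h b) := by
  unfold ntwStk
  have hp : ((PySem.List.pyRange k (h.length : Int) 1).filter (ntwP h k)).Pairwise (· < ·) :=
    (PySem.List.pairwise_lt_pyRange_one k (h.length : Int)).filter (ntwP h k)
  refine hp.imp_of_mem ?_
  intro a b ha hb hab
  have hbP := List.of_mem_filter hb
  have haR := List.mem_of_mem_filter ha
  unfold ntwP at hbP
  rw [List.all_eq_true] at hbP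
  rw [PySem.List.mem_pyRange_one] at haR
  have := hbP a (by rw [PySem.List.mem_pyRange_one]; omega)
  simp only [decide_eq_true_eq] at this
  omega

-- the stack recurrence: pushing i on the popped stack gives the spec at i
theorem ntwStk_cons (h : List Int) (i : Int) (_hi0 : 0 ≤ i) (hin : i < (h.length : Int)) :
    i :: (ntwStk h (i + 1)).filter (fun j => decide (ntwH h i < ntwH h j)) = ntwStk h i := by
  unfold ntwStk
  rw [List.filter_filter]
  rw [PySem.List.pyRange_one_cons hin, List.filter_cons]
  have hPi : ntwP h i i = true := by
    simp [ntwP, PySem.List.pyRange_one_eq_nil (le_refl i)]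
  rw [if_pos hPi]
  congr 1
  refine (List.filter_congr ?_).symm
  intro j hj
  rw [PySem.List.mem_pyRange_one] at hj
  unfold ntwP
  rw [PySem.List.pyRange_one_cons (by omega : i < j), List.all_cons]

-- head of the filtered stack is the reference "next taller" index
theorem ntwStk_head (h : List Int) (i : Int) :
    ((ntwStk h (i + 1)).filter (fun j => decide (ntwH h i < ntwH h j))).head? =
      (PySem.List.pyRange (i + 1) (h.length : Int) 1).find? (ntwQ h i) := by
  unfold ntwStk
  rw [List.filter_filter, List.head?_filter]
  have : (fun j => decide (ntwH h i < ntwH h j) && ntwP h (i + 1) j) =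
      (fun j => ntwQ h i j && ntwP h (i + 1) j) := by rfl
  rw [this]
  refine ntw_find_conj _ _ _ (PySem.List.pairwise_lt_pyRange_one _ _) ?_
  intro j hj hQj hmin
  rw [PySem.List.mem_pyRange_one] at hj
  unfold ntwP
  rw [List.all_eq_true]
  intro t ht
  rw [PySem.List.mem_pyRange_one] at ht
  have htf := hmin t (by rw [PySem.List.mem_pyRange_one]; omega) (by omega)
  unfold ntwQ at hQj htf
  simp only [decide_eq_true_eq] at hQj
  simp only [decide_eq_false_iff_not] at htf
  simp only [decide_eq_true_eq]
  omega

-- setting position i of the result spec array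
theorem ntwRes_set (h : List Int) (w : Int) (i : Int) (hi0 : 0 ≤ i) (_hin : i < (h.length : Int))
    (v : Int) (hv : v = ntwRef h w i) :
    PySem.List.pySetD (ntwRes h w (i + 1)) i v = ntwRes h w i := by
  rw [PySem.List.pySetD_of_nonneg _ v hi0]
  unfold ntwRes
  apply List.ext_getElem
  · simp [PySem.List.length_pyRange_one]
  · intro t h1 h2
    rw [List.getElem_set]
    rw [List.getElem_map, List.getElem_map]
    rw [PySem.List.getElem_pyRange_one]
    have ht : t < h.length := by
      simp [PySem.List.length_pyRange_one] at h2; omega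
    by_cases hti : i.toNat = t
    · rw [if_pos hti]
      have : (0 : Int) + (t : Int) = i := by omega
      rw [this, if_pos (le_refl i), hv]
    · rw [if_neg hti]
      have hne : (0 : Int) + (t : Int) ≠ i := by omega
      by_cases hle : i ≤ 0 + (t : Int)
      · rw [if_pos (by omega : i + 1 ≤ 0 + (t : Int)), if_pos hle]
      · rw [if_neg (by omega), if_neg hle]

-- result spec is unchanged at i when the reference value is -1
theorem ntwRes_skip (h : List Int) (w : Int) (i : Int) (hi0 : 0 ≤ i)
    (hv : ntwRef h w i = -1) : ntwRes h w (i + 1) = ntwRes h w i := by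
  unfold ntwRes
  refine List.map_congr_left ?_
  intro t ht
  rw [PySem.List.mem_pyRange_one] at ht
  by_cases hti : t = i
  · subst hti
    rw [if_neg (by omega), if_pos (le_refl t), hv]
  · by_cases hle : i ≤ t
    · rw [if_pos (by omega), if_pos hle]
    · rw [if_neg (by omega), if_neg hle]

-- one step of A's loop maps spec state at i+1 to spec state at i
theorem ntwStep_spec (h : List Int) (w : Int) (i : Int) (hi0 : 0 ≤ i) (hin : i < (h.length : Int)) :
    ntwStep h w (ntwRes h w (i + 1), ntwStk h (i + 1)) i = (ntwRes h w i, ntwStk h i) := by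
  have hpop : ntwPop h (PySem.List.pyGetD h i 0) (ntwStk h (i + 1)) =
      (ntwStk h (i + 1)).filter (fun j => decide (ntwH h i < ntwH h j)) :=
    ntwPop_eq_filter h (ntwH h i) (ntwStk h (i + 1)) (ntwStk_pairwise h (i + 1))
  have hhead := ntwStk_head h i
  have hcons := ntwStk_cons h i hi0 hin
  unfold ntwStep
  simp only [hpop]
  cases hF : (ntwStk h (i + 1)).filter (fun j => decide (ntwH h i < ntwH h j)) with
  | nil =>
    dsimp only
    have hfind : (PySem.List.pyRange (i + 1) (h.length : Int) 1).find? (ntwQ h i) = none := by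
      rw [← hhead, hF]; rfl
    have href : ntwRef h w i = -1 := by unfold ntwRef; rw [hfind]
    rw [hF] at hcons
    exact Prod.ext (ntwRes_skip h w i hi0 href) hcons
  | cons j rest =>
    dsimp only
    have hfind : (PySem.List.pyRange (i + 1) (h.length : Int) 1).find? (ntwQ h i) = some j := by
      rw [← hhead, hF]; rfl
    have href : ntwRef h w i = if j - i ≤ w then ntwH h j else -1 := by
      unfold ntwRef; rw [hfind]
    rw [hF] at hcons
    refine Prod.ext ?_ hcons
    by_cases hw : j - i ≤ w
    · rw [if_pos hw]
      exact ntwRes_set h w i hi0 hin _ (by rw [href, if_pos hw]; rfl)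
    · rw [if_neg hw]
      exact ntwRes_set h w i hi0 hin _ (by rw [href, if_neg hw])

-- A's whole loop, by downward induction
theorem ntwA_loop (h : List Int) (w : Int) : ∀ m : Nat, (m : Int) ≤ (h.length : Int) →
    (PySem.List.pyRange ((m : Int) - 1) (-1) (-1)).foldl (ntwStep h w)
      (ntwRes h w m, ntwStk h m) = (ntwRes h w 0, ntwStk h 0) := by
  intro m
  induction m with
  | zero =>
    intro _
    rw [PySem.List.pyRange_neg_one_eq_nil (by omega)]
    simp
  | succ m ih =>
    intro hm
    have hcast : ((m + 1 : Nat) : Int) - 1 = (m : Int) := by push_cast; ring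
    rw [hcast, PySem.List.pyRange_neg_one_cons (by omega : (-1 : Int) < (m : Int)), List.foldl_cons]
    have hstep := ntwStep_spec h w (m : Int) (by omega) (by omega)
    have hcast2 : ((m + 1 : Nat) : Int) = (m : Int) + 1 := by push_cast; ring
    rw [hcast2, hstep]
    exact ih (by omega)

-- B's scan is find? over the window
theorem ntwScan_eq_find (h : List Int) (x : Int) (js : List Int) :
    ntwScan h x js = (match js.find? (fun j => decide (x < ntwH h j)) with
      | some j => ntwH h j | none => -1) := by
  induction js with
  | nil => rfl
  | cons j rest ih =>
    by_cases hj : x < PySem.List.pyGetD h j 0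
    · simp [ntwScan, ntwH, hj]
    · simp [ntwScan, ntwH, hj, ih]

-- B's windowed scan computes the reference value
theorem ntwScan_ref (h : List Int) (w : Int) (i : Int) (_hi0 : 0 ≤ i) (hin : i < (h.length : Int)) :
    ntwScan h (PySem.List.pyGetD h i 0)
      (PySem.List.pyRange (i + 1) (min (i + w) ((h.length : Int) - 1) + 1) 1) = ntwRef h w i := by
  have hQ : (fun j => decide (PySem.List.pyGetD h i 0 < ntwH h j)) = ntwQ h i := rfl
  rw [ntwScan_eq_find, hQ]
  unfold ntwRef
  by_cases hM : min (i + w) ((h.length : Int) - 1) ≤ i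
  · -- empty window
    rw [PySem.List.pyRange_one_eq_nil (by omega)]
    by_cases hc : i + w ≤ (h.length : Int) - 1
    · have hw0 : w ≤ 0 := by have := min_eq_left hc; omega
      cases hf : (PySem.List.pyRange (i + 1) (h.length : Int) 1).find? (ntwQ h i) with
      | none => rfl
      | some j =>
        have hj := List.mem_of_find?_eq_some hf
        rw [PySem.List.mem_pyRange_one] at hj
        simp only [List.find?_nil]
        rw [if_neg (by omega)]
    · have hn : (h.length : Int) ≤ i + 1 := by
        have : min (i + w) ((h.length : Int) - 1) = (h.length : Int) - 1 := min_eq_right (by omega)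
        omega
      rw [PySem.List.pyRange_one_eq_nil (by omega)]
      rfl
  · -- nonempty window: split the full range at min(i+w, n-1)+1
    rw [not_le] at hM
    have hM2 : min (i + w) ((h.length : Int) - 1) + 1 ≤ (h.length : Int) := by omega
    rw [PySem.List.pyRange_one_append (i + 1) (min (i + w) ((h.length : Int) - 1) + 1)
      (h.length : Int) (by omega) hM2, List.find?_append]
    cases hf1 : (PySem.List.pyRange (i + 1) (min (i + w) ((h.length : Int) - 1) + 1) 1).find? (ntwQ h i) with
    | some j =>
      rw [Option.some_or]
      have hj := List.mem_of_find?_eq_some hf1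
      rw [PySem.List.mem_pyRange_one] at hj
      dsimp only
      rw [if_pos (by omega)]
    | none =>
      rw [Option.none_or]
      by_cases hc : i + w ≤ (h.length : Int) - 1
      · have hmin : min (i + w) ((h.length : Int) - 1) = i + w := min_eq_left hc
        cases hf2 : (PySem.List.pyRange (min (i + w) ((h.length : Int) - 1) + 1) (h.length : Int) 1).find? (ntwQ h i) with
        | none => rfl
        | some j =>
          have hj := List.mem_of_find?_eq_some hf2
          rw [PySem.List.mem_pyRange_one] at hj
          dsimp only
          rw [if_neg (by omega)]
      · have hmin : min (i + w) ((h.length : Int) - 1) = (h.length : Int) - 1 :=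
          min_eq_right (by omega)
        rw [hmin, PySem.List.pyRange_one_eq_nil (by omega)]
        rfl

-- initial state of A's loop is the spec state at n
theorem ntwRes_init (h : List Int) (w : Int) :
    List.replicate h.length (-1 : Int) = ntwRes h w (h.length : Int) := by
  unfold ntwRes
  symm
  rw [List.eq_replicate_iff]
  constructor
  · simp [PySem.List.length_pyRange_one]
  · intro b hb
    rw [List.mem_map] at hb
    obtain ⟨i, hi, hbi⟩ := hb
    rw [PySem.List.mem_pyRange_one] at hi
    rw [if_neg (by omega)] at hbi
    omega

theorem ntwStk_init (h : List Int) : ([] : List Int) = ntwStk h (h.length : Int) := by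
  unfold ntwStk
  rw [PySem.List.pyRange_one_eq_nil (le_refl _)]
  rfl

-- ===== VERDICT (by name: the statement is the Claim_ definition above) =====
theorem next_taller_within_spec : Claim_equal_next_taller_within := by
  intro h w _
  unfold Spec_next_taller_within next_taller_within next_taller_within_alt
  rw [PySem.List.foldl_append_singleton_eq_map]
  have hinit : (List.replicate h.length (-1 : Int), ([] : List Int)) =
      (ntwRes h w (h.length : Int), ntwStk h (h.length : Int)) := by
    rw [← ntwRes_init, ← ntwStk_init]
  rw [hinit, ntwA_loop h w h.length (le_refl _)]
  unfold ntwRes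
  simp only [List.nil_append]
  refine List.map_congr_left ?_
  intro i hi
  rw [PySem.List.mem_pyRange_one] at hi
  rw [if_pos (by omega)]
  exact (ntwScan_ref h w i (by omega) (by omega)).symm
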